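-- pv_equiv track=rewrite | github.com/AlexWUrobot/leetcode_python | calculate_max_greyness.py | calculate_greyness
-- ===== SOURCE A (Python) =====
-- def calculate_greyness(pixels):
--     # Initialize an empty list to store the greyness values for each cell
--     greyness = []
--
--     # Iterate over each row in the grid of pixels
--     for i in range(len(pixels)):
--         # Initialize an empty string to store the greyness values for each cell in the current row
--         row_greyness = ""
--
--         # Iterate over each column in the current row
--         for j in range(len(pixels[0])):
--             # Count the number of black pixels in the current row and column
--             black_row = pixels[i].count('1')
--             black_column = sum(1 for k in range(len(pixels)) if pixels[k][j] == '1')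
--
--             # Calculate the number of white pixels in the current row and column
--             white_row = len(pixels[0]) - black_row
--             white_column = len(pixels) - black_column
--
--             # Compute the greyness value for the current cell using the provided formula
--             cell_greyness = (black_row + black_column) - (white_row + white_column)
--
--             # Append the greyness value of the current cell to the string representing the current row
--             row_greyness += str(cell_greyness) + " "
--
--         # Append the string representing the greyness values of all cells in the current row to the list
--         greyness.append(row_greyness.strip())
--
--     # Return the list containing the greyness values for each cell in the grid
--     return greyness
-- ===== SOURCE B (Python) =====
-- def calculate_greyness(pixels):
--     if not pixels:
--         return []
--     w = len(pixels[0])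
--     h = len(pixels)
--     row_black = [row.count('1') for row in pixels]
--     col_black = [sum(1 for row in pixels if row[j] == '1') for j in range(w)]
--     out = []
--     for rb in row_black:
--         base = 2 * rb - w - h
--         out.append(" ".join(str(base + 2 * c) for c in col_black))
--     return out
-- ===== Notes on version B (the rewrite author's own statement) =====
-- stated objective: faster
-- what changed: Precompute per-row and per-column black counts once and emit each cell with the algebraically simplified formula 2*row+2*col-w-h via ' '.join, instead of recounting the whole row and column for every cell and building the row string by concatenation+strip.
import Mathlib
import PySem

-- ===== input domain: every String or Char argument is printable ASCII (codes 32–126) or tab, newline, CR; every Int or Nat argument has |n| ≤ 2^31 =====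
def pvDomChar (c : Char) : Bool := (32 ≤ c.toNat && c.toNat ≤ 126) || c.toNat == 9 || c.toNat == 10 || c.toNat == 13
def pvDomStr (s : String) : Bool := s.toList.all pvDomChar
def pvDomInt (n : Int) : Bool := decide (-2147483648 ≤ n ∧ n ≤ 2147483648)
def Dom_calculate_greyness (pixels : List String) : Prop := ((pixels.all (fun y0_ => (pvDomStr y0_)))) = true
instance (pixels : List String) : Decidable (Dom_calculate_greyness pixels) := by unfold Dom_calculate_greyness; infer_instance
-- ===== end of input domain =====

-- B precomputes the row/column black counts once and emits each row with a ' '.join over the simplified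
-- per-cell formula, instead of A's per-cell recount of its whole row and column: asymptotically faster.

-- ===== PORT A =====
-- literal transliteration of A; row strings are built on the List Char side (PySem.Chars is exact there)
def calculate_greyness (pixels : List String) : List String :=
  (PySem.List.pyRange 0 (PySem.List.len pixels)).foldl (fun greyness i =>
    let row_greyness : List Char :=
      (PySem.List.pyRange 0 (PySem.Str.len (PySem.List.pyGetD pixels 0 ""))).foldl (fun rg j =>
        let black_row : Int := (PySem.Str.count (PySem.List.pyGetD pixels i "") "1" : Int)
        let black_column : Int :=
          ((PySem.List.pyRange 0 (PySem.List.len pixels)).map (fun k =>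
            if PySem.Str.pyGet? (PySem.List.pyGetD pixels k "") j = some '1' then (1 : Int) else 0)).sum
        let white_row : Int := PySem.Str.len (PySem.List.pyGetD pixels 0 "") - black_row
        let white_column : Int := PySem.List.len pixels - black_column
        let cell_greyness : Int := (black_row + black_column) - (white_row + white_column)
        rg ++ (PySem.Int.toChars cell_greyness ++ [' '])) []
    greyness ++ [String.mk (PySem.Chars.strip row_greyness)]) []

-- ===== PORT B =====
-- literal transliteration of Source B (row/column counts precomputed once, then one join per row)
def calculate_greyness_alt (pixels : List String) : List String :=
  if pixels = [] then []
  else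
    let w : Int := PySem.Str.len (PySem.List.pyGetD pixels 0 "")
    let h : Int := PySem.List.len pixels
    let row_black : List Int := pixels.map (fun row => (PySem.Str.count row "1" : Int))
    let col_black : List Int :=
      (PySem.List.pyRange 0 w).map (fun j =>
        ((pixels.map (fun row =>
          if PySem.Str.pyGet? row j = some '1' then (1 : Int) else 0)).sum))
    row_black.foldl (fun out rb =>
      let base : Int := 2 * rb - w - h
      out ++ [String.mk (PySem.Chars.join [' ']
        (col_black.map (fun c => PySem.Int.toChars (base + 2 * c))))]) []

-- ===== PRECONDITION & SPEC =====
-- Pre_ excludes exactly the inputs on which Python A raises IndexError: a row shorter than the first row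
-- (A indexes every row at every column index of row 0).
def Pre_calculate_greyness (pixels : List String) : Prop :=
  ∀ r ∈ pixels, (pixels.headD "").toList.length ≤ r.toList.length
instance (pixels : List String) : Decidable (Pre_calculate_greyness pixels) := by
  unfold Pre_calculate_greyness; infer_instance
def pvWitness_calculate_greyness : List String := ["101", "010", "110"]
def Spec_calculate_greyness (pixels : List String) (out : List String) : Prop := out = calculate_greyness_alt pixels
instance (pixels : List String) (out : List String) : Decidable (Spec_calculate_greyness pixels out) := by unfold Spec_calculate_greyness; infer_instance

-- ===== CLAIM (what is proved, stated in full; the proofs are below) =====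
def Claim_equal_calculate_greyness : Prop := ∀ (pixels : List String), Dom_calculate_greyness pixels → Pre_calculate_greyness pixels → Spec_calculate_greyness pixels (calculate_greyness pixels)

-- ===== LEMMAS AND PROOFS =====

lemma nonspace_digitChar (m : Nat) (hm : m < 10) : PySem.Chars.isspace (Nat.digitChar m) = false := by
  interval_cases m <;> decide

lemma nonspace_toDigitsCore (f : Nat) :
    ∀ (n : Nat) (acc : List Char), (∀ c ∈ acc, PySem.Chars.isspace c = false) →
      ∀ c ∈ Nat.toDigitsCore 10 f n acc, PySem.Chars.isspace c = false := by
  induction f with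
  | zero => intro n acc hacc; simpa [Nat.toDigitsCore] using hacc
  | succ f ih =>
    intro n acc hacc c hc
    rw [Nat.toDigitsCore] at hc
    have hmem : ∀ d ∈ Nat.digitChar (n % 10) :: acc, PySem.Chars.isspace d = false := by
      intro d hd
      rcases List.mem_cons.mp hd with h | h
      · subst h; exact nonspace_digitChar _ (Nat.mod_lt _ (by norm_num))
      · exact hacc _ h
    by_cases h0 : n / 10 = 0
    · simp only [h0, if_true] at hc
      exact hmem _ hc
    · simp only [h0, if_false] at hc
      exact ih _ _ hmem _ hc

lemma length_toDigitsCore (f : Nat) :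
    ∀ (n : Nat) (acc : List Char), acc.length ≤ (Nat.toDigitsCore 10 f n acc).length := by
  induction f with
  | zero => intro n acc; simp [Nat.toDigitsCore]
  | succ f ih =>
    intro n acc
    rw [Nat.toDigitsCore]
    by_cases h0 : n / 10 = 0
    · simp [h0]
    · simp only [h0, if_false]
      calc acc.length ≤ (Nat.digitChar (n % 10) :: acc).length := by simp
        _ ≤ _ := ih _ _

lemma toChars_ne_nil (c : Int) : PySem.Int.toChars c ≠ [] := by
  unfold PySem.Int.toChars
  split
  · simp
  · unfold Nat.toDigits
    rw [Nat.toDigitsCore]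
    by_cases h0 : c.toNat / 10 = 0
    · simp [h0]
    · simp only [h0, if_false]
      have := length_toDigitsCore c.toNat (c.toNat / 10) [Nat.digitChar (c.toNat % 10)]
      intro hnil
      rw [hnil] at this
      simp at this

lemma toChars_nonspace (c : Int) : ∀ ch ∈ PySem.Int.toChars c, PySem.Chars.isspace ch = false := by
  unfold PySem.Int.toChars
  split
  · intro ch hch
    rcases List.mem_cons.mp hch with h | h
    · subst h; decide
    · exact nonspace_toDigitsCore _ _ [] (by simp) _ h
  · intro ch hch
    exact nonspace_toDigitsCore _ _ [] (by simp) _ hch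

-- lstrip is the identity on a list whose head is not whitespace
lemma lstrip_of_head_nonspace (x : Char) (xs : List Char) (hx : PySem.Chars.isspace x = false) :
    PySem.Chars.lstrip (x :: xs) = x :: xs := by
  simp [PySem.Chars.lstrip, hx]

-- rstrip distributes over an append whose right part does not strip to nothing
lemma rstrip_append (x y : List Char) (hy : PySem.Chars.rstrip y ≠ []) :
    PySem.Chars.rstrip (x ++ y) = x ++ PySem.Chars.rstrip y := by
  unfold PySem.Chars.rstrip at *
  rw [List.reverse_append, List.dropWhile_append]
  have : (List.dropWhile PySem.Chars.isspace y.reverse).isEmpty = false := by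
    cases hE : (List.dropWhile PySem.Chars.isspace y.reverse).isEmpty
    · rfl
    · exact absurd (by rw [List.isEmpty_iff.mp hE]; rfl) hy
  rw [this]
  simp

lemma rstrip_of_all_nonspace (y : List Char) (hy : ∀ c ∈ y, PySem.Chars.isspace c = false) :
    PySem.Chars.rstrip y = y := by
  unfold PySem.Chars.rstrip
  rw [List.dropWhile_eq_self_iff.mpr, List.reverse_reverse]
  intro h
  have h' : y.length - 1 < y.length := by simp at h; omega
  simp only [List.getElem_reverse]
  simp [hy _ (List.getElem_mem h')]

-- a "block" is nonempty and contains no whitespace characters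
def GoodBlock (b : List Char) : Prop := b ≠ [] ∧ ∀ c ∈ b, PySem.Chars.isspace c = false

lemma rstrip_blocks (blocks : List (List Char)) (hb : ∀ b ∈ blocks, GoodBlock b) :
    PySem.Chars.rstrip (blocks.flatMap (fun b => b ++ [' '])) =
      PySem.Chars.join [' '] blocks := by
  induction blocks with
  | nil => decide
  | cons b rest ih =>
    have hbb := hb b List.mem_cons_self
    have hrest : ∀ b' ∈ rest, GoodBlock b' := fun b' h => hb b' (List.mem_cons_of_mem _ h)
    cases rest with
    | nil =>
      show PySem.Chars.rstrip (b ++ [' '] ++ []) = _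
      rw [List.append_nil]
      have h2 : PySem.Chars.rstrip (b ++ [' ']) = PySem.Chars.rstrip b := by
        unfold PySem.Chars.rstrip
        simp [show PySem.Chars.isspace ' ' = true from rfl]
      rw [h2, rstrip_of_all_nonspace b hbb.2]
      simp [PySem.Chars.join, List.intercalate]
    | cons b' rest' =>
      have hne : PySem.Chars.rstrip ((b' :: rest').flatMap (fun x => x ++ [' '])) ≠ [] := by
        rw [ih hrest]
        have hb'' := (hrest b' List.mem_cons_self).1
        simp only [PySem.Chars.join, List.intercalate]
        cases rest' with
        | nil => simp [List.intersperse]; exact hb''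
        | cons c cs => simp [List.intersperse]
      show PySem.Chars.rstrip (b ++ [' '] ++ (b' :: rest').flatMap (fun x => x ++ [' '])) = _
      rw [List.append_assoc,
          rstrip_append b ([' '] ++ (b' :: rest').flatMap (fun x => x ++ [' ']))
            (by rw [rstrip_append [' '] _ hne]; simp),
          rstrip_append [' '] _ hne, ih hrest]
      simp [PySem.Chars.join, List.intercalate, List.intersperse]

lemma strip_blocks (blocks : List (List Char)) (hb : ∀ b ∈ blocks, GoodBlock b) :
    PySem.Chars.strip (blocks.flatMap (fun b => b ++ [' '])) =
      PySem.Chars.join [' '] blocks := by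
  cases blocks with
  | nil => decide
  | cons b rest =>
    have hbb := hb b List.mem_cons_self
    unfold PySem.Chars.strip
    have hl : PySem.Chars.lstrip ((b :: rest).flatMap (fun x => x ++ [' '])) =
        (b :: rest).flatMap (fun x => x ++ [' ']) := by
      obtain ⟨x, xs, hx⟩ : ∃ x xs, b = x :: xs := by
        cases b with
        | nil => exact absurd rfl hbb.1
        | cons x xs => exact ⟨x, xs, rfl⟩
      rw [List.flatMap_cons, hx]
      exact lstrip_of_head_nonspace x _ (hbb.2 x (by simp [hx]))
    rw [hl, rstrip_blocks _ hb]

-- A's row build (append each cell text plus a space, then strip) equals a ' '.join of the cell texts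
lemma strip_fold_row (cell : Int → Int) (l : List Int) :
    PySem.Chars.strip (l.foldl (fun rg j => rg ++ (PySem.Int.toChars (cell j) ++ [' '])) []) =
      PySem.Chars.join [' '] (l.map (fun j => PySem.Int.toChars (cell j))) := by
  rw [PySem.List.foldl_append_eq_flatMap (fun j => PySem.Int.toChars (cell j) ++ [' ']) l [],
      List.nil_append]
  have hfm : l.flatMap (fun j => PySem.Int.toChars (cell j) ++ [' ']) =
      (l.map (fun j => PySem.Int.toChars (cell j))).flatMap (fun b => b ++ [' ']) := by
    rw [List.flatMap_map]
  rw [hfm]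
  refine strip_blocks _ ?_
  intro b hbm
  obtain ⟨j, _, rfl⟩ := List.mem_map.mp hbm
  exact ⟨toChars_ne_nil _, toChars_nonspace _⟩

-- pyRange 0 len composed with pyGetD is the list itself, under any further map
lemma map_f_pyGetD {α β : Type} (xs : List α) (d : α) (F : α → β) :
    (PySem.List.pyRange 0 (PySem.List.len xs)).map (fun k => F (PySem.List.pyGetD xs k d)) =
      xs.map F := by
  conv_rhs => rw [← PySem.List.map_pyGetD_pyRange_zero xs d]
  rw [List.map_map]
  rfl

-- ===== VERDICT (by name: the statement is the Claim_ definition above) =====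
theorem calculate_greyness_spec : Claim_equal_calculate_greyness := by
  intro pixels _ _
  unfold Spec_calculate_greyness calculate_greyness calculate_greyness_alt
  by_cases hnil : pixels = []
  · subst hnil
    simp [PySem.List.len, PySem.List.pyRange]
  · rw [if_neg hnil]
    rw [PySem.List.foldl_append_singleton_eq_map, List.nil_append,
        PySem.List.foldl_append_singleton_eq_map, List.nil_append,
        map_f_pyGetD pixels ""
          (fun row => String.mk (PySem.Chars.strip
            ((PySem.List.pyRange 0 (PySem.Str.len (PySem.List.pyGetD pixels 0 ""))).foldl (fun rg j =>
              rg ++ (PySem.Int.toChars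
                (((PySem.Str.count row "1" : Int) +
                    ((PySem.List.pyRange 0 (PySem.List.len pixels)).map (fun k =>
                      if PySem.Str.pyGet? (PySem.List.pyGetD pixels k "") j = some '1' then (1 : Int) else 0)).sum) -
                  ((PySem.Str.len (PySem.List.pyGetD pixels 0 "") - (PySem.Str.count row "1" : Int)) +
                    (PySem.List.len pixels -
                      ((PySem.List.pyRange 0 (PySem.List.len pixels)).map (fun k =>
                        if PySem.Str.pyGet? (PySem.List.pyGetD pixels k "") j = some '1' then (1 : Int) else 0)).sum))) ++ [' '])) []))),
        List.map_map]
    refine List.map_congr_left ?_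
    intro r _
    show String.mk (PySem.Chars.strip _) = String.mk (PySem.Chars.join [' '] _)
    rw [strip_fold_row (fun j =>
        (((PySem.Str.count r "1" : Int) +
            ((PySem.List.pyRange 0 (PySem.List.len pixels)).map (fun k =>
              if PySem.Str.pyGet? (PySem.List.pyGetD pixels k "") j = some '1' then (1 : Int) else 0)).sum) -
          ((PySem.Str.len (PySem.List.pyGetD pixels 0 "") - (PySem.Str.count r "1" : Int)) +
            (PySem.List.len pixels -
              ((PySem.List.pyRange 0 (PySem.List.len pixels)).map (fun k =>
                if PySem.Str.pyGet? (PySem.List.pyGetD pixels k "") j = some '1' then (1 : Int) else 0)).sum))))]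
    rw [List.map_map]
    refine congrArg String.mk (congrArg (PySem.Chars.join [' ']) (List.map_congr_left ?_))
    intro j _
    show PySem.Int.toChars _ = PySem.Int.toChars _
    refine congrArg PySem.Int.toChars ?_
    rw [map_f_pyGetD pixels ""
      (fun row => if PySem.Str.pyGet? row j = some '1' then (1 : Int) else 0)]
    ring
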